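-- pv_equiv track=rewrite | github.com/JosephSBoyle/advent_of_code_2024 | day_9.py | organise_blocks
-- ===== SOURCE A (Python) =====
-- def organise_blocks(blocks: list[str]) -> list[str]:
--     """Re-organise blocks into a contiguous structure"""
--
--     blocks = list(blocks)
--     min_empty_block_index = 0
--     for i in reversed(range(len(blocks))):
--         char = blocks[i]
--         if char == ".":
--             continue
--
--         # Iterate from the RHS to find the first non-empty block
--
--         # Iterate from LHS up to the block we're trying to move
--         # to find first empty block
--         for j in range(min_empty_block_index, i):
--             candidate_block = blocks[j]
--             if candidate_block == ".":
--                 # swap the two blocks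
--                 blocks[j] = char
--                 blocks[i] = "."
--
--                 # save where we found the empty block + 1-- this
--                 # is where we ought to begin our search next time!
--                 min_empty_block_index = j + 1
--
--                 # Only do exactly one 'swap'.
--                 break
--     return blocks
-- ===== SOURCE B (Python) =====
-- def organise_blocks(blocks: list[str]) -> list[str]:
--     """Re-organise blocks into a contiguous structure (closed form, one pass)."""
--     k = sum(1 for b in blocks if b != ".")
--     fills = [b for b in reversed(blocks[k:]) if b != "."]
--     out = []
--     for b in blocks[:k]:
--         if b == ".":
--             out.append(fills[0])
--             fills = fills[1:]
--         else:
--             out.append(b)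
--     return out + ["."] * (len(blocks) - k)
-- ===== Notes on version B (the rewrite author's own statement) =====
-- stated objective: faster
-- what changed: Replaces the nested right-to-left scan with repeated left scans for holes by a closed form: count the non-empty blocks k, collect the non-empty blocks past position k in reverse, and fill the holes in the first k slots with them in one pass.
import Mathlib
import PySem

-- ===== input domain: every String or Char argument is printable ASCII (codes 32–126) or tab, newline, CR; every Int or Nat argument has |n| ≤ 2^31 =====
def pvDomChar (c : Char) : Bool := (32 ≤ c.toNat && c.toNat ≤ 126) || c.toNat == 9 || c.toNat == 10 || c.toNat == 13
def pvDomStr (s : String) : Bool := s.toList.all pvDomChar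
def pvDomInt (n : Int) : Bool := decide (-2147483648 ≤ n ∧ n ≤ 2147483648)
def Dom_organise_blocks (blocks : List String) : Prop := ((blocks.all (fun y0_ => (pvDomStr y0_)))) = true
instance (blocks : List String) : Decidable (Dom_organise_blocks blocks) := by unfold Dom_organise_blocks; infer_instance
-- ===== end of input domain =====

-- B replaces A's quadratic nested scans by a one-pass closed form (count + fill); objective: faster (asymptotic).

-- ===== PORT A =====
-- inner loop `for j in range(m, i): … break`: first index j in [m, i) holding "."
def findDot (bs : List String) (j i : Nat) : Option Nat :=
  if j < i then
    if bs.getD j "" == "." then some j else findDot bs (j+1) i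
  else none
termination_by i - j

-- outer loop `for i in reversed(range(len(blocks)))`: fuel f processes indices f-1, …, 0
def outerA : List String → Nat → Nat → List String
  | bs, _, 0 => bs
  | bs, m, (i+1) =>
    let c := bs.getD i ""
    if c == "." then outerA bs m i
    else
      match findDot bs m i with
      | some j => outerA ((bs.set j c).set i ".") (j+1) i
      | none => outerA bs m i

def organise_blocks (blocks : List String) : List String :=
  outerA blocks 0 blocks.length

-- ===== PORT B =====
-- `for b in blocks[:k]: …` consuming fills at the holes
def fillLoop : List String → List String → List String
  | [], _ => []
  | b :: rest, fills =>
    if b == "." then fills.headD "." :: fillLoop rest fills.tail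
    else b :: fillLoop rest fills

def organise_blocks_alt (blocks : List String) : List String :=
  let k := (blocks.filter (fun b => b ≠ ".")).length
  let fills := ((blocks.drop k).reverse).filter (fun b => b ≠ ".")
  fillLoop (blocks.take k) fills ++ List.replicate (blocks.length - k) "."

-- ===== PRECONDITION & SPEC =====
def Spec_organise_blocks (blocks : List String) (out : List String) : Prop := out = organise_blocks_alt blocks
instance (blocks : List String) (out : List String) : Decidable (Spec_organise_blocks blocks out) := by unfold Spec_organise_blocks; infer_instance

-- ===== CLAIM (what is proved, stated in full; the proofs are below) =====
def Claim_equal_organise_blocks : Prop := ∀ (blocks : List String), Dom_organise_blocks blocks → Spec_organise_blocks blocks (organise_blocks blocks)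

-- ===== LEMMAS AND PROOFS =====

-- every position < m is a non-dot (or out of range)
def NoDotBelow (bs : List String) (m : Nat) : Prop :=
  ∀ p, p < m → bs.getD p "" ≠ "."

-- every in-range position ≥ i is a dot
def AllDotsFrom (bs : List String) (i : Nat) : Prop :=
  ∀ q, i ≤ q → q < bs.length → bs.getD q "" = "."

-- non-dots all precede dots
def Packed (bs : List String) : Prop :=
  ∀ p q, p < q → q < bs.length → bs.getD q "" ≠ "." → bs.getD p "" ≠ "."

theorem getD_dot_lt_length {bs : List String} {p : Nat} (h : bs.getD p "" = ".") :
    p < bs.length := by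
  by_contra hn
  rw [List.getD_eq_default _ _ (by omega)] at h
  simp at h

theorem findDot_some {bs : List String} {j i r : Nat} (h : findDot bs j i = some r) :
    j ≤ r ∧ r < i ∧ bs.getD r "" = "." ∧ ∀ p, j ≤ p → p < r → bs.getD p "" ≠ "." := by
  by_cases hji : j < i
  · rw [findDot, if_pos hji] at h
    by_cases hd : bs.getD j "" = "."
    · rw [if_pos (by simpa using hd)] at h
      cases h
      exact ⟨le_rfl, hji, hd, fun p h1 h2 => by omega⟩
    · rw [if_neg (by simpa using hd)] at h
      obtain ⟨h1, h2, h3, h4⟩ := findDot_some h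
      refine ⟨by omega, h2, h3, fun p hp1 hp2 => ?_⟩
      rcases Nat.eq_or_lt_of_le hp1 with he | hl
      · exact he ▸ hd
      · exact h4 p hl hp2
  · rw [findDot, if_neg hji] at h
    cases h
termination_by i - j

theorem findDot_none {bs : List String} {j i : Nat} (h : findDot bs j i = none) :
    ∀ p, j ≤ p → p < i → bs.getD p "" ≠ "." := by
  intro p hp1 hp2
  by_cases hji : j < i
  · rw [findDot, if_pos hji] at h
    by_cases hd : bs.getD j "" = "."
    · rw [if_pos (by simpa using hd)] at h; cases h
    · rw [if_neg (by simpa using hd)] at h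
      rcases Nat.eq_or_lt_of_le hp1 with he | hl
      · exact he ▸ hd
      · exact findDot_none h p hl hp2
  · omega
termination_by i - j

theorem outerA_packed (i : Nat) (bs : List String) (m : Nat)
    (hlen : i ≤ bs.length) (hp : Packed bs) : outerA bs m i = bs := by
  induction i generalizing m with
  | zero => rfl
  | succ i ih =>
    rw [outerA]
    by_cases hc : bs.getD i "" = "."
    · rw [if_pos (by simpa using hc)]
      exact ih m (by omega)
    · rw [if_neg (by simpa using hc)]
      cases hfd : findDot bs m i with
      | some j =>
        obtain ⟨_, hj2, hj3, _⟩ := findDot_some hfd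
        exact absurd hj3 (hp j i hj2 (by omega) hc)
      | none => exact ih m (by omega)

theorem packed_tail {b : String} {rest : List String} (hp : Packed (b :: rest)) :
    Packed rest := by
  intro p q hpq hq hqd
  have h := hp (p+1) (q+1) (by omega) (by simpa using Nat.succ_lt_succ hq)
    (by simpa using hqd)
  simpa using h

theorem alt_replicate (m : Nat) :
    organise_blocks_alt (List.replicate m ".") = List.replicate m "." := by
  simp [organise_blocks_alt, fillLoop]

theorem alt_cons_nondot (b : String) (rest : List String) (hb : b ≠ ".") :
    organise_blocks_alt (b :: rest) = b :: organise_blocks_alt rest := by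
  have hk : ((b :: rest).filter (fun x => x ≠ ".")).length
      = (rest.filter (fun x => x ≠ ".")).length + 1 := by
    simp [hb]
  have hkle : (rest.filter (fun x => x ≠ ".")).length ≤ rest.length :=
    List.length_filter_le _ _
  simp only [organise_blocks_alt, hk, List.take_succ_cons, List.drop_succ_cons,
    List.length_cons]
  rw [fillLoop, if_neg (by simpa using hb)]
  have : rest.length + 1 - ((rest.filter (fun x => x ≠ ".")).length + 1)
      = rest.length - (rest.filter (fun x => x ≠ ".")).length := by omega
  rw [this]
  simp

theorem alt_packed (bs : List String) (hp : Packed bs) : organise_blocks_alt bs = bs := by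
  induction bs with
  | nil => rfl
  | cons b rest ih =>
    by_cases hb : b = "."
    · subst hb
      have hall : ∀ q, q < rest.length → rest.getD q "" = "." := by
        intro q hq
        by_contra hnd
        exact (hp 0 (q+1) (by omega) (by simpa using Nat.succ_lt_succ hq)
          (by simpa using hnd)) rfl
      have hrep : rest = List.replicate rest.length "." := by
        apply List.ext_getElem (by simp)
        intro n h1 h2
        have h := hall n (by simpa using h1)
        rw [List.getD_eq_getElem _ _ (by simpa using h1)] at h
        simpa using h
      rw [hrep]
      have : ("." : String) :: List.replicate rest.length "."
          = List.replicate (rest.length + 1) "." := by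
        rw [List.replicate_succ]
      rw [this, alt_replicate]
    · rw [alt_cons_nondot b rest hb, ih (packed_tail hp)]

theorem fillLoop_append_nondot (P rest fs : List String) (hP : ∀ b ∈ P, b ≠ ".") :
    fillLoop (P ++ rest) fs = P ++ fillLoop rest fs := by
  induction P with
  | nil => rfl
  | cons a P ih =>
    rw [List.cons_append, fillLoop, if_neg (by simpa using hP a (by simp))]
    rw [ih (fun b hb => hP b (by simp [hb]))]
    rfl

theorem set_len_append (P : List String) (x y : String) (Z : List String) (n : Nat)
    (hn : n = P.length) : (P ++ x :: Z).set n y = P ++ y :: Z := by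
  subst hn
  induction P with
  | nil => rfl
  | cons a P ih => simp [ih]

theorem alt_swap' (P Q R : List String) (c : String)
    (hP : ∀ b ∈ P, b ≠ ".") (hc : c ≠ ".") (hR : ∀ b ∈ R, b = ".") :
    organise_blocks_alt (P ++ c :: Q ++ "." :: R) = organise_blocks_alt (P ++ "." :: Q ++ c :: R) := by
  have hfP : P.filter (fun b => !decide (b = ".")) = P :=
    List.filter_eq_self.mpr (fun b hb => by simpa using hP b hb)
  have hfR : R.filter (fun b => !decide (b = ".")) = [] :=
    List.filter_eq_nil_iff.mpr (fun b hb => by simp [hR b hb])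
  have hfRrev : R.reverse.filter (fun b => !decide (b = ".")) = [] :=
    List.filter_eq_nil_iff.mpr (fun b hb => by simp [hR b (List.mem_reverse.mp hb)])
  have hkle : (Q.filter (fun b => !decide (b = "."))).length ≤ Q.length := List.length_filter_le _ _
  simp only [organise_blocks_alt]
  simp [List.filter_append, hc, hfP, hfR]
  rw [List.take_length_add_append, List.take_length_add_append,
    List.take_succ_cons, List.take_succ_cons,
    List.take_append_of_le_length hkle, List.take_append_of_le_length hkle,
    List.drop_append_of_le_length hkle, List.drop_append_of_le_length hkle]
  rw [fillLoop_append_nondot _ _ _ hP, fillLoop_append_nondot _ _ _ hP]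
  simp [List.filter_append, hfR, fillLoop, hc]

-- the KEY lemma: one swap of A preserves B's closed form
theorem alt_swap (bs : List String) (i j : Nat)
    (hi : i < bs.length) (hci : bs.getD i "" ≠ ".")
    (htail : AllDotsFrom bs (i+1))
    (hj : bs.getD j "" = ".") (hji : j < i)
    (hfirst : ∀ p, p < j → bs.getD p "" ≠ ".") :
    organise_blocks_alt ((bs.set j (bs.getD i "")).set i ".") = organise_blocks_alt bs := by
  have hjlen : j < bs.length := by omega
  obtain ⟨c, hc_def⟩ : ∃ c, bs.getD i "" = c := ⟨_, rfl⟩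
  rw [hc_def] at hci ⊢
  have hlenP : (bs.take j).length = j := by simp; omega
  have hlenQ : ((bs.drop (j+1)).take (i - j - 1)).length = i - j - 1 := by simp; omega
  have e3 : (bs.drop (j+1)).drop (i - j - 1) = bs.drop i := by
    rw [List.drop_drop]; congr 1; omega
  have e2 : bs.drop (j+1) = (bs.drop (j+1)).take (i - j - 1) ++ c :: bs.drop (i+1) := by
    conv_lhs => rw [← List.take_append_drop (i - j - 1) (bs.drop (j+1))]
    rw [e3, List.drop_eq_getElem_cons hi,
      show bs[i] = bs.getD i "" from (List.getD_eq_getElem bs "" hi).symm, hc_def]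
  have hdec : bs = bs.take j ++ "." :: ((bs.drop (j+1)).take (i - j - 1) ++ c :: bs.drop (i+1)) := by
    conv_lhs => rw [← List.take_append_drop j bs]
    conv_lhs => rw [List.drop_eq_getElem_cons hjlen]
    rw [show bs[j] = bs.getD j "" from (List.getD_eq_getElem bs "" hjlen).symm, hj]
    conv_lhs => rw [e2]
  have hset : (bs.set j c).set i "." =
      bs.take j ++ c :: ((bs.drop (j+1)).take (i - j - 1) ++ "." :: bs.drop (i+1)) := by
    conv_lhs => rw [hdec]
    rw [set_len_append _ _ _ _ j hlenP.symm]
    rw [show bs.take j ++ c :: ((bs.drop (j+1)).take (i - j - 1) ++ c :: bs.drop (i+1))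
      = (bs.take j ++ c :: (bs.drop (j+1)).take (i - j - 1)) ++ c :: bs.drop (i+1) by simp]
    rw [set_len_append _ _ _ _ i (by simp [hlenP, hlenQ]; omega)]
    simp
  have hP : ∀ b ∈ bs.take j, b ≠ "." := by
    intro b hb
    obtain ⟨p, hplt, rfl⟩ := List.mem_iff_getElem.mp hb
    rw [List.getElem_take]
    have hpj : p < j := by simpa [hlenP] using hplt
    have h := hfirst p hpj
    rwa [List.getD_eq_getElem bs "" (by omega)] at h
  have hR : ∀ b ∈ bs.drop (i+1), b = "." := by
    intro b hb
    obtain ⟨p, hplt, rfl⟩ := List.mem_iff_getElem.mp hb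
    rw [List.getElem_drop]
    have hlt : i + 1 + p < bs.length := by simp at hplt; omega
    have h := htail (i+1+p) (by omega) hlt
    rwa [List.getD_eq_getElem bs "" hlt] at h
  rw [hset]
  conv_rhs => rw [hdec]
  have h := alt_swap' (bs.take j) ((bs.drop (j+1)).take (i - j - 1)) (bs.drop (i+1)) c hP hci hR
  simpa using h


theorem getD_set_ne (l : List String) (n m : Nat) (a d : String) (h : n ≠ m) :
    (l.set n a).getD m d = l.getD m d := by
  simp [List.getD, List.getElem?_set_ne h]

theorem getD_set_self (l : List String) (n : Nat) (a d : String) (h : n < l.length) :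
    (l.set n a).getD n d = a := by
  simp [List.getD, h]

theorem outerA_main (i : Nat) : ∀ (bs : List String) (m : Nat), i ≤ bs.length →
    NoDotBelow bs m → AllDotsFrom bs i → outerA bs m i = organise_blocks_alt bs := by
  induction i with
  | zero =>
    intro bs m _ _ hall
    have hp : Packed bs := fun p q hpq hq hqd => absurd (hall q (by omega) hq) hqd
    exact (alt_packed bs hp).symm
  | succ i ih =>
    intro bs m hlen hnd hall
    rw [outerA]
    by_cases hc : bs.getD i "" = "."
    · rw [if_pos (by simpa using hc)]
      refine ih bs m (by omega) hnd ?_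
      intro q hq1 hq2
      rcases Nat.eq_or_lt_of_le hq1 with he | hl
      · exact he ▸ hc
      · exact hall q hl hq2
    · rw [if_neg (by simpa using hc)]
      cases hfd : findDot bs m i with
      | some j =>
        obtain ⟨hj1, hj2, hj3, hj4⟩ := findDot_some hfd
        have hjlen : j < bs.length := getD_dot_lt_length hj3
        have hfirst : ∀ p, p < j → bs.getD p "" ≠ "." := by
          intro p hp
          by_cases hpm : p < m
          · exact hnd p hpm
          · exact hj4 p (by omega) hp
        have hswap := alt_swap bs i j (by omega) hc hall hj3 hj2 hfirst
        show outerA ((bs.set j (bs.getD i "")).set i ".") (j+1) i = organise_blocks_alt bs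
        rw [ih ((bs.set j (bs.getD i "")).set i ".") (j+1) (by simpa using (by omega : i ≤ bs.length)) ?_ ?_]
        · exact hswap
        · intro p hp
          rcases Nat.lt_or_ge p j with hlt | hge
          · rw [getD_set_ne _ _ _ _ _ (by omega), getD_set_ne _ _ _ _ _ (by omega)]
            exact hfirst p hlt
          · have hpj : p = j := by omega
            subst hpj
            rw [getD_set_ne _ _ _ _ _ (by omega),
              getD_set_self _ _ _ _ (by simpa using hjlen)]
            exact hc
        · intro q hq1 hq2
          have hqlen : q < bs.length := by simpa using hq2
          rcases Nat.eq_or_lt_of_le hq1 with he | hl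
          · subst he
            rw [getD_set_self _ _ _ _ (by simpa using hqlen)]
          · rw [getD_set_ne _ _ _ _ _ (by omega), getD_set_ne _ _ _ _ _ (by omega)]
            exact hall q hl hqlen
      | none =>
        have hnd' : ∀ p, p < i → bs.getD p "" ≠ "." := by
          intro p hp
          by_cases hpm : p < m
          · exact hnd p hpm
          · exact findDot_none hfd p (by omega) hp
        have hp : Packed bs := by
          intro p q hpq hq hqd
          have hqi : q ≤ i := by
            by_contra h
            exact hqd (hall q (by omega) hq)
          exact hnd' p (by omega)
        show outerA bs m i = organise_blocks_alt bs
        rw [outerA_packed i bs m (by omega) hp, alt_packed bs hp]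

-- ===== VERDICT (by name: the statement is the Claim_ definition above) =====
theorem organise_blocks_spec : Claim_equal_organise_blocks := by
  intro bs _
  unfold Spec_organise_blocks organise_blocks
  exact outerA_main bs.length bs 0 le_rfl (fun p hp => by omega) (fun q h1 h2 => by omega)
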